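-- pv_equiv track=rewrite | github.com/lgisler/cpp_statecharts | pre-commit-hooks/sort-cspell-words.py | sort_and_deduplicate_words
-- ===== SOURCE A (Python) =====
-- def sort_and_deduplicate_words(words):
--     seen = set()
--     result = []
--     for word in words:
--         key = word.lower()
--         if key not in seen:
--             seen.add(key)
--             result.append(word)
--     # Now sort by lower-case, but keep original case
--     return sorted(result, key=lambda w: w.lower())
-- ===== SOURCE B (Python) =====
-- def sort_and_deduplicate_words(words):
--     ordered = sorted(words, key=lambda w: w.lower())
--     result = []
--     prev = None
--     for word in ordered:
--         key = word.lower()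
--         if key != prev:
--             result.append(word)
--             prev = key
--     return result
-- ===== Notes on version B (the rewrite author's own statement) =====
-- stated objective: alternative
-- what changed: B sorts the whole list first (stable sort by lowercase key) and removes duplicates in a single adjacent-scan keeping the previous kept key, instead of A's hash-set first-occurrence filter followed by a sort.
import Mathlib
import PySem

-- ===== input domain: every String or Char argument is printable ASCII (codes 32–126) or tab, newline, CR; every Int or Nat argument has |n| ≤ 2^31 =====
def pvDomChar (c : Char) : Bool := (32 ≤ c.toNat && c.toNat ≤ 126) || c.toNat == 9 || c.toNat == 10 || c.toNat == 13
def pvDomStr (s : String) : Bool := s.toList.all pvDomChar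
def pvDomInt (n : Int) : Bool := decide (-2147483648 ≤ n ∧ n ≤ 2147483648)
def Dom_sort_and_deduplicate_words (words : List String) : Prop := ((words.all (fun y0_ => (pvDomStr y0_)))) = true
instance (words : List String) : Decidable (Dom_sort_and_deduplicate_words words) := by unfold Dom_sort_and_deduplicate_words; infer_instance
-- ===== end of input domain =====

-- B sorts the whole list once (stable sort by lowercase key) and drops now-adjacent
-- duplicate-key words in a single scan, instead of A's set-based first-occurrence
-- filter followed by a sort; same result, a different decomposition (no speed claim).


-- ===== PORT A =====
-- the lowercase key, shared spelling on both sides ('word.lower()')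
def pvLow (w : String) : String := PySem.Str.lower w

-- A's loop: state (seen, result); append word when its lowered key is unseen
def pvAStep (st : PySem.Set String × List String) (word : String) :
    PySem.Set String × List String :=
  let key := pvLow word
  if st.1.contains key then st else (st.1.add key, st.2 ++ [word])

def sort_and_deduplicate_words (words : List String) : List String :=
  PySem.List.sorted (words.foldl pvAStep (([] : PySem.Set String), ([] : List String))).2 pvLow false

-- ===== PORT B =====
-- B's scan over the sorted list: keep a word iff its key differs from the previous kept key
def pvBGo (prev : Option String) : List String → List String
  | [] => []
  | w :: ws =>
    let key := pvLow w
    if some key = prev then pvBGo prev ws else w :: pvBGo (some key) ws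

def sort_and_deduplicate_words_alt (words : List String) : List String :=
  pvBGo none (PySem.List.sorted words pvLow false)

-- ===== PRECONDITION & SPEC =====
def Spec_sort_and_deduplicate_words (words : List String) (out : List String) : Prop := out = sort_and_deduplicate_words_alt words
instance (words : List String) (out : List String) : Decidable (Spec_sort_and_deduplicate_words words out) := by unfold Spec_sort_and_deduplicate_words; infer_instance

-- ===== CLAIM (what is proved, stated in full; the proofs are below) =====
def Claim_equal_sort_and_deduplicate_words : Prop := ∀ (words : List String), Dom_sort_and_deduplicate_words words → Spec_sort_and_deduplicate_words words (sort_and_deduplicate_words words)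

-- ===== LEMMAS AND PROOFS =====

-- A's loop in structurally recursive form (seen as explicit parameter)
def pvAGo (seen : PySem.Set String) : List String → List String
  | [] => []
  | w :: ws =>
    let key := pvLow w
    if seen.contains key then pvAGo seen ws else w :: pvAGo (seen.add key) ws

theorem pvA_foldl (ws : List String) : ∀ (seen : PySem.Set String) (res : List String),
    (ws.foldl pvAStep (seen, res)).2 = res ++ pvAGo seen ws := by
  induction ws with
  | nil => intro seen res; simp [pvAGo]
  | cons w ws ih =>
    intro seen res
    simp only [List.foldl_cons, pvAStep, pvAGo]
    by_cases h : pvLow w ∈ seen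
    · simp [h, ih]
    · simp [h, ih]

-- membership in A's loop output: a is kept iff its key is unseen and a is the FIRST
-- element of ws carrying its key
theorem pvA_mem (ws : List String) : ∀ (seen : PySem.Set String) (a : String),
    a ∈ pvAGo seen ws ↔
      ¬ (pvLow a) ∈ seen ∧ (ws.filter (fun w => pvLow w = pvLow a)).head? = some a := by
  induction ws with
  | nil => intro seen a; simp [pvAGo]
  | cons w ws ih =>
    intro seen a
    by_cases hs : pvLow w ∈ seen
    · have hc : seen.contains (pvLow w) = true := by simpa using hs
      simp only [pvAGo, hc, if_true]
      rw [ih seen a]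
      by_cases hk : pvLow w = pvLow a
      · rw [hk] at hs
        constructor
        · rintro ⟨hna, _⟩; exact absurd hs hna
        · rintro ⟨hna, _⟩; exact absurd hs hna
      · simp [hk]
    · have hc : seen.contains (pvLow w) = false := by simpa using hs
      simp only [pvAGo, hc, Bool.false_eq_true, if_false, List.mem_cons]
      by_cases hk : pvLow w = pvLow a
      · simp only [List.filter_cons, hk, decide_true, if_true, List.head?_cons]
        constructor
        · rintro (rfl | hm)
          · exact ⟨hs, rfl⟩
          · exfalso
            have := (ih _ a).1 hm
            exact this.1 (by rw [PySem.Set.mem_add]; right; rfl)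
        · rintro ⟨hna, hhd⟩
          left; exact (Option.some_injective _ hhd).symm
      · simp only [List.filter_cons, hk, decide_false, Bool.false_eq_true, if_false]
        constructor
        · rintro (rfl | hm)
          · exact absurd rfl hk
          · have := (ih _ a).1 hm
            refine ⟨fun hin => this.1 ?_, this.2⟩
            rw [PySem.Set.mem_add]; left; exact hin
        · rintro ⟨hna, hhd⟩
          right
          rw [ih _ a]
          refine ⟨?_, hhd⟩
          rw [PySem.Set.mem_add]
          rintro (h | h)
          · exact hna h
          · exact hk h.symm

-- membership in B's scan output, on a key-sorted list
theorem pvB_mem (ws : List String) : ∀ (prev : Option String),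
    ws.Pairwise (fun x y => pvLow x ≤ pvLow y) →
    (∀ p, prev = some p → ∀ w ∈ ws, p ≤ pvLow w) →
    ∀ a, a ∈ pvBGo prev ws ↔
      some (pvLow a) ≠ prev ∧ (ws.filter (fun w => pvLow w = pvLow a)).head? = some a := by
  induction ws with
  | nil => intro prev _ _ a; simp [pvBGo]
  | cons w ws ih =>
    intro prev hpw hprev a
    have hpw' : ws.Pairwise (fun x y => pvLow x ≤ pvLow y) := hpw.tail
    have hwle : ∀ b ∈ ws, pvLow w ≤ pvLow b := by
      intro b hb; exact (List.pairwise_cons.1 hpw).1 b hb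
    simp only [pvBGo]
    by_cases heq : some (pvLow w) = prev
    · rw [if_pos heq]
      rw [ih prev hpw' (by rintro p rfl b hb; exact (hprev p rfl w (List.mem_cons_self)).trans (hwle b hb) |>.trans (le_refl _)) a]
      by_cases hk : pvLow a = pvLow w
      · have h1 : some (pvLow a) = prev := by rw [hk]; exact heq
        simp only [h1, ne_eq, not_true_eq_false, false_and]
      · rw [List.filter_cons]
        simp [show ¬ (pvLow w = pvLow a) from fun h => hk h.symm]
    · rw [if_neg heq]
      simp only [List.mem_cons]
      by_cases ha : a = w
      · subst ha
        simp only [true_or, true_iff, List.filter_cons]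
        refine ⟨heq, by simp⟩
      · simp only [ha, false_or]
        rw [ih (some (pvLow w)) hpw' (by
          rintro p hp b hb; injection hp with hp; subst hp; exact hwle b hb) a]
        rw [List.filter_cons]
        by_cases hk : pvLow a = pvLow w
        · simp only [hk, if_pos, decide_eq_true_eq, if_pos rfl, List.head?_cons]
          constructor
          · rintro ⟨hne, _⟩; exact absurd rfl hne
          · rintro ⟨_, hhd⟩
            exact absurd ((Option.some_injective _ hhd).symm) ha
        · simp only [show ¬ (pvLow w = pvLow a) from fun h => hk h.symm, decide_eq_true_eq,
            if_neg, if_false]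
          constructor
          · rintro ⟨hne, hhd⟩
            refine ⟨?_, hhd⟩
            rintro hp
            -- prev bounds every key below, and keys of ws are ≥ pvLow w, forcing pvLow w = p
            have hamem : a ∈ ws := by
              have : a ∈ List.filter (fun x => decide (pvLow x = pvLow a)) ws :=
                List.mem_of_mem_head? (by rw [hhd]; rfl)
              exact List.mem_of_mem_filter this
            have h1 : pvLow a ≤ pvLow w := by
              have := hprev (pvLow a) hp.symm w List.mem_cons_self; exact this
            have h2 : pvLow w ≤ pvLow a := hwle a hamem
            exact heq (by rw [← le_antisymm h2 h1] at hp; exact hp)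
          · rintro ⟨hne, hhd⟩
            exact ⟨by simpa using fun h => hk h, hhd⟩
  
-- every member of B's scan output is a member of the input list
theorem pvB_sub (ws : List String) : ∀ (prev : Option String), ∀ a ∈ pvBGo prev ws, a ∈ ws := by
  induction ws with
  | nil => intro prev a ha; simpa [pvBGo] using ha
  | cons w ws ih =>
    intro prev a ha
    simp only [pvBGo] at ha
    by_cases h : some (pvLow w) = prev
    · rw [if_pos h] at ha; exact List.mem_cons_of_mem _ (ih prev a ha)
    · rw [if_neg h] at ha
      rcases List.mem_cons.1 ha with rfl | ha
      · exact List.mem_cons_self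
      · exact List.mem_cons_of_mem _ (ih (some (pvLow w)) a ha)

-- B's scan output has strictly increasing keys (on a key-sorted input)
theorem pvB_pairwise (ws : List String) : ∀ (prev : Option String),
    ws.Pairwise (fun x y => pvLow x ≤ pvLow y) →
    (pvBGo prev ws).Pairwise (fun x y => pvLow x < pvLow y) := by
  induction ws with
  | nil => intro prev _; simp [pvBGo]
  | cons w ws ih =>
    intro prev hpw
    have hpw' := hpw.tail
    have hwle : ∀ b ∈ ws, pvLow w ≤ pvLow b := (List.pairwise_cons.1 hpw).1
    simp only [pvBGo]
    by_cases h : some (pvLow w) = prev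
    · rw [if_pos h]; exact ih prev hpw'
    · rw [if_neg h]
      refine List.pairwise_cons.2 ⟨?_, ih (some (pvLow w)) hpw'⟩
      intro b hb
      have hb1 : b ∈ ws := pvB_sub ws (some (pvLow w)) b hb
      have hb2 : some (pvLow b) ≠ some (pvLow w) := by
        have := (pvB_mem ws (some (pvLow w)) hpw'
          (by rintro p hp c hc; injection hp with hp; subst hp; exact hwle c hc) b).1 hb
        exact this.1
      have : pvLow w ≤ pvLow b := hwle b hb1
      exact lt_of_le_of_ne this (fun hc => hb2 (by rw [hc]))

-- ===== stability of PySem's insertion sort, for the filter on one key value =====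
theorem pv_insertBy_perm (x : String) (acc : List String) :
    (PySem.List.insertBy (fun a b => decide (pvLow a < pvLow b)) x acc).Perm (x :: acc) := by
  induction acc with
  | nil => simp [PySem.List.insertBy]
  | cons z zs ihz =>
    simp only [PySem.List.insertBy]
    by_cases hz : pvLow x < pvLow z
    · simp [hz]
    · simp only [hz, decide_false, Bool.false_eq_true, not_false_eq_true, if_neg]
      exact (List.Perm.cons z ihz).trans (List.Perm.swap x z zs)

theorem pv_insertBy_pairwise (x : String) (acc : List String)
    (h : acc.Pairwise (fun a b => pvLow a ≤ pvLow b)) :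
    (PySem.List.insertBy (fun a b => decide (pvLow a < pvLow b)) x acc).Pairwise
      (fun a b => pvLow a ≤ pvLow b) := by
  induction acc with
  | nil => simp [PySem.List.insertBy]
  | cons y ys ih =>
    have hy : ∀ b ∈ ys, pvLow y ≤ pvLow b := (List.pairwise_cons.1 h).1
    simp only [PySem.List.insertBy]
    by_cases hlt : pvLow x < pvLow y
    · simp only [hlt, decide_true, if_pos]
      refine List.pairwise_cons.2 ⟨?_, h⟩
      intro b hb
      rcases List.mem_cons.1 hb with rfl | hb
      · exact le_of_lt hlt
      · exact (le_of_lt hlt).trans (hy b hb)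
    · simp only [hlt, decide_false, if_neg, Bool.false_eq_true, not_false_eq_true]
      refine List.pairwise_cons.2 ⟨?_, ih h.tail⟩
      intro b hb
      have : b = x ∨ b ∈ ys := by
        simpa using (pv_insertBy_perm x ys).mem_iff.1 hb
      rcases this with rfl | hb'
      · exact le_of_not_gt hlt
      · exact hy b hb'

theorem pv_insertBy_filter (x : String) (k : String) (acc : List String)
    (h : acc.Pairwise (fun a b => pvLow a ≤ pvLow b)) :
    (PySem.List.insertBy (fun a b => decide (pvLow a < pvLow b)) x acc).filter
        (fun w => pvLow w = k) =
      acc.filter (fun w => pvLow w = k) ++ (if pvLow x = k then [x] else []) := by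
  induction acc with
  | nil => simp only [PySem.List.insertBy, List.filter_cons, List.filter_nil, List.nil_append]; split_ifs with h1 <;> simp_all
  | cons y ys ih =>
    have hy : ∀ b ∈ ys, pvLow y ≤ pvLow b := (List.pairwise_cons.1 h).1
    simp only [PySem.List.insertBy]
    by_cases hlt : pvLow x < pvLow y
    · simp only [hlt, decide_true, if_pos]
      by_cases hx : pvLow x = k
      · -- all of y :: ys have key > k, so their filter is empty
        have hnone : (y :: ys).filter (fun w => pvLow w = k) = [] := by
          rw [List.filter_eq_nil_iff]
          intro b hb
          rcases List.mem_cons.1 hb with rfl | hb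
          · simp only [decide_eq_true_eq]; intro hc; rw [← hx] at hc; exact absurd hc (ne_of_gt hlt); 
          · simp only [decide_eq_true_eq]; intro hc
            have : pvLow y ≤ pvLow b := hy b hb
            rw [hc, ← hx] at this
            exact absurd (lt_of_lt_of_le hlt this) (lt_irrefl _)
        rw [List.filter_cons, if_pos (by simpa using hx), hnone, hx]
        simp
      · rw [List.filter_cons, if_neg (by simpa using hx)]
        simp [hx]
    · simp only [hlt, decide_false, Bool.false_eq_true, not_false_eq_true, if_neg]
      rw [List.filter_cons, List.filter_cons, ih h.tail]
      by_cases hyk : pvLow y = k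
      · simp [hyk]
      · simp [hyk]

theorem pv_sorted_filter (ws : List String) (k : String) :
    (PySem.List.sorted ws pvLow false).filter (fun w => pvLow w = k) =
      ws.filter (fun w => pvLow w = k) := by
  suffices H : ∀ (acc : List String), acc.Pairwise (fun a b => pvLow a ≤ pvLow b) →
      (ws.foldl (fun acc x => PySem.List.insertBy (fun a b => decide (pvLow a < pvLow b)) x acc) acc).filter
        (fun w => pvLow w = k) =
        acc.filter (fun w => pvLow w = k) ++ ws.filter (fun w => pvLow w = k) by
    have := H [] (by simp)
    simpa [PySem.List.sorted] using this
  induction ws with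
  | nil => intro acc _; simp
  | cons w ws ih =>
    intro acc hacc
    simp only [List.foldl_cons]
    rw [ih _ (pv_insertBy_pairwise w acc hacc), pv_insertBy_filter w k acc hacc,
      List.filter_cons]
    by_cases hw : pvLow w = k
    · simp [hw]
    · simp [hw]

-- elements of A's loop output (keys pairwise distinct ⇒ nodup)
theorem pvA_nodup (ws : List String) : ∀ (seen : PySem.Set String),
    (pvAGo seen ws).Pairwise (fun a b => pvLow a ≠ pvLow b) := by
  induction ws with
  | nil => intro seen; simp [pvAGo]
  | cons w ws ih =>
    intro seen
    simp only [pvAGo]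
    by_cases hs : seen.contains (pvLow w)
    · rw [if_pos hs]; exact ih seen
    · rw [if_neg hs]
      refine List.pairwise_cons.2 ⟨?_, ih _⟩
      intro b hb
      have := (pvA_mem ws (seen.add (pvLow w)) b).1 hb
      intro hc
      exact this.1 (by rw [PySem.Set.mem_add]; right; exact hc.symm)

-- ===== VERDICT (by name: the statement is the Claim_ definition above) =====
theorem sort_and_deduplicate_words_spec : Claim_equal_sort_and_deduplicate_words := by
  intro words _
  unfold Spec_sort_and_deduplicate_words sort_and_deduplicate_words sort_and_deduplicate_words_alt
  rw [pvA_foldl words [] [], List.nil_append]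
  set S := PySem.List.sorted words pvLow false with hS
  have hSpw : S.Pairwise (fun a b => pvLow a ≤ pvLow b) := PySem.List.sorted_pairwise words pvLow
  have hBpw : (pvBGo none S).Pairwise (fun a b => pvLow a < pvLow b) := pvB_pairwise S none hSpw
  -- membership equality between B's result and A's pre-sort result
  have hmem : ∀ a, a ∈ pvBGo none S ↔ a ∈ pvAGo ([] : PySem.Set String) words := by
    intro a
    rw [pvB_mem S none hSpw (by rintro p hp; cases hp), pvA_mem]
    constructor
    · rintro ⟨_, hhd⟩
      refine ⟨by simp, ?_⟩
      rw [← pv_sorted_filter words (pvLow a)]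
      exact hhd
    · rintro ⟨_, hhd⟩
      refine ⟨by simp, ?_⟩
      rw [hS, pv_sorted_filter words (pvLow a)]
      exact hhd
  have hBnd : (pvBGo none S).Nodup :=
    hBpw.imp (fun {a b} h => fun hc => (ne_of_lt h) (by rw [hc]))
  have hAnd : (pvAGo ([] : PySem.Set String) words).Nodup :=
    (pvA_nodup words []).imp (fun {a b} h => fun hc => h (by rw [hc]))
  have hperm : (pvBGo none S).Perm (pvAGo ([] : PySem.Set String) words) :=
    (List.perm_ext_iff_of_nodup hBnd hAnd).2 hmem
  exact PySem.List.sorted_eq_of_perm_of_pairwise_lt _ _ pvLow hperm hBpw
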